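-- pv_equiv track=rewrite | github.com/Complexum/Proyecto-2025A | src/controllers/strategies/geometric.py | encontrar_vecinos_inmediatos
-- ===== SOURCE A (Python) =====
-- def encontrar_vecinos_inmediatos(i, j):
--     vecinos = []
--     d_ij = sum(c1 != c2 for c1, c2 in zip(i, j))
--     for pos in range(len(i)):
--         vecino = list(i)
--         vecino[pos] = '1' if i[pos] == '0' else '0'
--         vecino_str = ''.join(vecino)
--         d_kj = sum(c1 != c2 for c1, c2 in zip(vecino_str, j))
--         if d_kj < d_ij:
--             vecinos.append(vecino_str)
--     return vecinos
-- ===== SOURCE B (Python) =====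
-- def encontrar_vecinos_inmediatos(i, j):
--     # Single pass: the flip at pos reduces the (zip-truncated) Hamming distance
--     # to j exactly when the flipped character equals j[pos].
--     vecinos = []
--     for pos in range(min(len(i), len(j))):
--         f = '1' if i[pos] == '0' else '0'
--         if f == j[pos]:
--             vecinos.append(i[:pos] + f + i[pos + 1:])
--     return vecinos
-- ===== Notes on version B (the rewrite author's own statement) =====
-- stated objective: faster
-- what changed: B never recomputes a Hamming distance: one pass over the first min(len(i),len(j)) positions keeps pos exactly when the flipped character equals j[pos], building each neighbor by slicing.
import Mathlib
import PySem

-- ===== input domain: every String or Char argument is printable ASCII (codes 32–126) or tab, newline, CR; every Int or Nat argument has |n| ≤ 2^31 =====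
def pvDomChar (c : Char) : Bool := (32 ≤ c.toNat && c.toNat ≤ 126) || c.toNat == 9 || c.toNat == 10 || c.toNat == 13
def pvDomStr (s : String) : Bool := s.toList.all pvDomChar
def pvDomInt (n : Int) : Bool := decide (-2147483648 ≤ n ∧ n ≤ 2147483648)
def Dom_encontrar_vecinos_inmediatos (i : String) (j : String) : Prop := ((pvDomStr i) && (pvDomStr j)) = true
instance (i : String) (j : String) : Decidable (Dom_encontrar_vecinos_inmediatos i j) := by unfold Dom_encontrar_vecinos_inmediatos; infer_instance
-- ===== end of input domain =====

-- B replaces A's per-position Hamming-distance recomputation (O(n^2)) by a single pass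
-- that keeps a flip exactly when the flipped character equals j[pos] (objective: faster).

-- ===== PORT A =====
-- sum(c1 != c2 for c1, c2 in zip(a, b)) : exact, zip truncates to the shorter list
def pvHam : List Char → List Char → Nat
  | c1 :: a, c2 :: b => (if c1 ≠ c2 then 1 else 0) + pvHam a b
  | _, _ => 0

def encontrar_vecinos_inmediatos (i : String) (j : String) : List String :=
  let li := i.toList
  let lj := j.toList
  let d_ij := pvHam li lj
  (List.range li.length).foldl (fun vecinos pos =>
    -- vecino = list(i); vecino[pos] = '1' if i[pos]=='0' else '0'; vecino_str = ''.join(vecino)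
    let vecino := li.set pos (if li.getD pos ' ' = '0' then '1' else '0')
    let d_kj := pvHam vecino lj
    if d_kj < d_ij then vecinos ++ [String.mk vecino] else vecinos) []

-- ===== PORT B =====
def encontrar_vecinos_inmediatos_alt (i : String) (j : String) : List String :=
  let li := i.toList
  let lj := j.toList
  (List.range (min li.length lj.length)).foldl (fun vecinos pos =>
    let f : Char := if li.getD pos ' ' = '0' then '1' else '0'
    if f = lj.getD pos ' ' then
      -- i[:pos] + f + i[pos+1:]
      vecinos ++ [String.mk (li.take pos ++ [f] ++ li.drop (pos + 1))]
    else vecinos) []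

-- ===== PRECONDITION & SPEC =====
def Spec_encontrar_vecinos_inmediatos (i : String) (j : String) (out : List String) : Prop := out = encontrar_vecinos_inmediatos_alt i j
instance (i : String) (j : String) (out : List String) : Decidable (Spec_encontrar_vecinos_inmediatos i j out) := by unfold Spec_encontrar_vecinos_inmediatos; infer_instance

-- ===== CLAIM (what is proved, stated in full; the proofs are below) =====
def Claim_equal_encontrar_vecinos_inmediatos : Prop := ∀ (i : String) (j : String), Dom_encontrar_vecinos_inmediatos i j → Spec_encontrar_vecinos_inmediatos i j (encontrar_vecinos_inmediatos i j)

-- ===== LEMMAS AND PROOFS =====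

-- Flipping position pos strictly lowers the truncated Hamming distance iff
-- pos is within both strings and the new character matches b there.
theorem pvHam_set_lt (a b : List Char) (pos : Nat) (c : Char)
    (hpos : pos < a.length) (hc : c ≠ a.getD pos ' ') :
    (pvHam (a.set pos c) b < pvHam a b) ↔ (pos < b.length ∧ c = b.getD pos ' ') := by
  induction pos generalizing a b with
  | zero =>
    cases a with
    | nil => simp at hpos
    | cons x a' =>
      cases b with
      | nil => simp [pvHam]
      | cons y b' =>
        have hcx : c ≠ x := by simpa using hc
        simp only [List.set, pvHam, List.length_cons, List.getD_cons_zero]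
        constructor
        · intro h
          refine ⟨Nat.succ_pos _, ?_⟩
          by_contra hcy
          split_ifs at h <;> omega
        · rintro ⟨-, rfl⟩
          rw [if_neg (by simp), if_pos (Ne.symm hcx)]
          omega
  | succ p ih =>
    cases a with
    | nil => simp at hpos
    | cons x a' =>
      cases b with
      | nil => simp [pvHam]
      | cons y b' =>
        have key := ih a' b' (by simpa using hpos) (by simpa using hc)
        simp only [List.set, pvHam, List.length_cons, Nat.succ_lt_succ_iff,
          List.getD_cons_succ]
        rw [Nat.add_lt_add_iff_left]
        exact key

-- the flipped character always differs from the original one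
theorem pvFlip_ne (c : Char) : (if c = '0' then '1' else '0') ≠ c := by
  split_ifs with h
  · simp [h]
  · exact fun h' => h h'.symm

-- ===== VERDICT (by name: the statement is the Claim_ definition above) =====
theorem encontrar_vecinos_inmediatos_spec : Claim_equal_encontrar_vecinos_inmediatos := by
  intro i j _
  unfold Spec_encontrar_vecinos_inmediatos encontrar_vecinos_inmediatos encontrar_vecinos_inmediatos_alt
  simp only []
  set li := i.toList with hli
  set lj := j.toList with hlj
  rw [PySem.List.foldl_append_ite
        (p := fun pos => pvHam (li.set pos (if li.getD pos ' ' = '0' then '1' else '0')) lj < pvHam li lj)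
        (f := fun pos => String.mk (li.set pos (if li.getD pos ' ' = '0' then '1' else '0'))),
      PySem.List.foldl_append_ite
        (p := fun pos => (if li.getD pos ' ' = '0' then '1' else '0') = lj.getD pos ' ')
        (f := fun pos => String.mk (li.take pos ++ [if li.getD pos ' ' = '0' then '1' else '0'] ++ li.drop (pos + 1)))]
  simp only [List.nil_append]
  have hmn : li.length = min li.length lj.length + (li.length - min li.length lj.length) := by omega
  have hsplit : List.range li.length = List.range (min li.length lj.length) ++
      (List.range (li.length - min li.length lj.length)).map (min li.length lj.length + ·) := by
    conv_lhs => rw [hmn]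
    exact List.range_add
  rw [hsplit, List.filter_append]
  have h2 : (((List.range (li.length - min li.length lj.length)).map (min li.length lj.length + ·)).filter
      (fun pos => decide (pvHam (li.set pos (if li.getD pos ' ' = '0' then '1' else '0')) lj < pvHam li lj))) = [] := by
    rw [List.filter_eq_nil_iff]
    intro pos hmem
    simp only [List.mem_map, List.mem_range] at hmem
    obtain ⟨k, hk, rfl⟩ := hmem
    have hlt : min li.length lj.length + k < li.length := by omega
    simp only [decide_eq_true_eq]
    rw [pvHam_set_lt li lj _ _ hlt (pvFlip_ne _)]
    rintro ⟨hb, -⟩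
    omega
  rw [h2, List.append_nil]
  have h3 : ((List.range (min li.length lj.length)).filter
      (fun pos => decide (pvHam (li.set pos (if li.getD pos ' ' = '0' then '1' else '0')) lj < pvHam li lj)))
      = ((List.range (min li.length lj.length)).filter
      (fun pos => decide ((if li.getD pos ' ' = '0' then '1' else '0') = lj.getD pos ' '))) := by
    apply List.filter_congr
    intro pos hpos
    simp only [List.mem_range] at hpos
    simp only [decide_eq_decide]
    rw [pvHam_set_lt li lj _ _ (by omega) (pvFlip_ne _)]
    constructor
    · exact fun h => h.2
    · exact fun h => ⟨by omega, h⟩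
  rw [h3]
  apply List.map_congr_left
  intro pos hpos
  have hposlt : pos < li.length := by
    have := List.mem_range.mp (List.mem_of_mem_filter hpos)
    omega
  rw [List.set_eq_take_cons_drop _ hposlt]
  simp
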